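-- pv_equiv track=rewrite | github.com/ovasquezn/booksNotes | 77_Python_Advanced_Programming_Exercises/exercise_05_greatest_prime_factor.py | calculate_using_factorization
-- ===== SOURCE A (Python) =====
-- def calculate_using_factorization(n):
--     """
--     Versión que usa la factorización completa y luego toma el máximo.
--     Menos eficiente pero más directa.
--
--     Args:
--         n (int): Número natural
--
--     Returns:
--         int: El mayor factor primo del número
--     """
--     if n < 2:
--         return None
--
--     factors = []
--     num = n
--
--     # Factorización completa
--     while num % 2 == 0:
--         factors.append(2)
--         num //= 2
--
--     i = 3
--     while i * i <= num:
--         while num % i == 0: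
--             factors.append(i)
--             num //= i
--         i += 2
--
--     if num > 1:
--         factors.append(num)
--
--     return max(factors) if factors else None
-- ===== SOURCE B (Python) =====
-- def _spf(m):
--     """Least prime factor of m (m itself if prime), by scanning candidates up to sqrt(m)."""
--     d = 2
--     while d * d <= m:
--         if m % d == 0:
--             return d
--         d += 1
--     return m
--
-- def calculate_using_factorization(n):
--     if n < 2:
--         return None
--     ans = None
--     while n > 1:
--         p = _spf(n)
--         ans = p
--         while n % p == 0:
--             n //= p
--     return ans
-- ===== Notes on version B (the rewrite author's own statement) =====
-- stated objective: alternative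
-- what changed: A runs one full trial-division sweep collecting every prime factor into a list and takes max(); B never builds a list: it repeatedly rescans from the smallest candidate to find the least prime factor of the current value, strips it out completely, and returns the last factor stripped, which is the greatest.
import Mathlib
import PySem

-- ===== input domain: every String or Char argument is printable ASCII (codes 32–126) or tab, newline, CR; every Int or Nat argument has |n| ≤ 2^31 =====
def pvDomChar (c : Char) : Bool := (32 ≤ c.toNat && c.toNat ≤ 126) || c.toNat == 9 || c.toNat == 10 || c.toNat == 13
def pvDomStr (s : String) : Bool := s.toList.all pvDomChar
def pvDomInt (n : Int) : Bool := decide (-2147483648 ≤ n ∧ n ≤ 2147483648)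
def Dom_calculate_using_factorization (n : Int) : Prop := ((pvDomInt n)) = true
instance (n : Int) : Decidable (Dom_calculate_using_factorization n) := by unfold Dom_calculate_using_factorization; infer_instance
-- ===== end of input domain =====

-- B is an ALTERNATIVE decomposition (not faster): repeatedly take the smallest prime factor
-- (fresh scan from 2 each round) and strip it out, returning the last one stripped,
-- instead of A's single full-factorization sweep followed by max().
-- All intermediate Python ints are nonnegative here, so Nat division/mod is exact.

-- ===== PORT A =====
-- inner `while num % i == 0: factors.append(i); num //= i` (guard 2 ≤ i keeps it total; A only calls it with i ≥ 2)
def pvStrip (i num : ℕ) (acc : List ℕ) : ℕ × List ℕ :=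
  if h : 2 ≤ i ∧ i ∣ num ∧ 0 < num then
    pvStrip i (num / i) (acc ++ [i])
  else (num, acc)
termination_by num
decreasing_by exact Nat.div_lt_self h.2.2 h.1

-- termination helper for the odd-i loop (cited by pvOdd's decreasing_by)
theorem pvOdd_dec (i num k : ℕ) (hii : i * i ≤ num) (hk : k ≤ num) :
    k + 1 - (i + 2) < num + 1 - i := by
  have h2 : i ≤ num := by
    rcases Nat.eq_zero_or_pos i with h0 | h0
    · omega
    · calc i ≤ i * i := Nat.le_mul_of_pos_left i h0
        _ ≤ num := hii
  omega

-- termination helper for the _spf scan (cited by pvSpf's decreasing_by)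
theorem pvSpf_dec (d m : ℕ) (h : d * d ≤ m) : m + 1 - (d + 1) < m + 1 - d := by
  have : d ≤ m := by
    rcases Nat.eq_zero_or_pos d with h0 | h0
    · omega
    · calc d ≤ d * d := Nat.le_mul_of_pos_left d h0
        _ ≤ m := h
  omega

theorem pvStrip_fst_le (i num : ℕ) (acc : List ℕ) : (pvStrip i num acc).1 ≤ num := by
  induction num using Nat.strong_induction_on generalizing acc with
  | _ num ih =>
    rw [pvStrip]
    split
    · rename_i h
      exact le_trans (ih _ (Nat.div_lt_self h.2.2 h.1) _) (Nat.le_of_lt (Nat.div_lt_self h.2.2 h.1))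
    · exact le_refl _

-- `i = 3; while i * i <= num: <pvStrip>; i += 2`
def pvOdd (i num : ℕ) (acc : List ℕ) : ℕ × List ℕ :=
  if h : i * i ≤ num then
    let r := pvStrip i num acc
    pvOdd (i + 2) r.1 r.2
  else (num, acc)
termination_by num + 1 - i
decreasing_by exact pvOdd_dec i num _ h (pvStrip_fst_le i num acc)

def calculate_using_factorization (n : Int) : Option Int :=
  if n < 2 then none
  else
    let m := n.toNat
    let r1 := pvStrip 2 m []            -- the factor-2 loop
    let r2 := pvOdd 3 r1.1 r1.2         -- the odd-i loop
    let factors := if 1 < r2.1 then r2.2 ++ [r2.1] else r2.2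
    -- `max(factors) if factors else None` (max? is none exactly on [])
    (PySem.List.max? factors (fun x => x)).map Int.ofNat

-- ===== PORT B =====
-- helper _spf: scan d = 2, 3, … while d*d ≤ m; first divisor, else m
def pvSpf (d m : ℕ) : ℕ :=
  if h : d * d ≤ m then
    if m % d = 0 then d else pvSpf (d + 1) m
  else m
termination_by m + 1 - d
decreasing_by exact pvSpf_dec d m h

theorem pvSpf_dvd (d m : ℕ) : pvSpf d m ∣ m := by
  fun_induction pvSpf d m with
  | case1 d h hd => exact Nat.dvd_of_mod_eq_zero hd
  | case2 d h hd ih => exact ih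
  | case3 d h => exact dvd_refl _

theorem pvSpf_two_le (d m : ℕ) (hd : 2 ≤ d) (hm : 2 ≤ m) : 2 ≤ pvSpf d m := by
  fun_induction pvSpf d m with
  | case1 d h hd2 => exact hd
  | case2 d h hd2 ih => exact ih (by omega)
  | case3 d h => exact hm

-- inner `while n % p == 0: n //= p` (guard keeps it total; B only calls it with p ≥ 2, p ∣ n)
def pvDivOut (p m : ℕ) : ℕ :=
  if h : 2 ≤ p ∧ p ∣ m ∧ 0 < m then pvDivOut p (m / p) else m
termination_by m
decreasing_by exact Nat.div_lt_self h.2.2 h.1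

theorem pvDivOut_le (p m : ℕ) : pvDivOut p m ≤ m := by
  induction m using Nat.strong_induction_on with
  | _ m ih =>
    rw [pvDivOut]
    split
    · rename_i h
      exact le_trans (ih _ (Nat.div_lt_self h.2.2 h.1)) (Nat.le_of_lt (Nat.div_lt_self h.2.2 h.1))
    · exact le_refl _

theorem pvDivOut_lt (p m : ℕ) (hp : 2 ≤ p) (hdvd : p ∣ m) (hm : 0 < m) :
    pvDivOut p m < m := by
  rw [pvDivOut]
  rw [dif_pos ⟨hp, hdvd, hm⟩]
  exact lt_of_le_of_lt (pvDivOut_le p (m / p)) (Nat.div_lt_self hm hp)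

-- `while n > 1: p = _spf(n); ans = p; <divide p out>`
def pvLoopB (m : ℕ) (ans : Option ℕ) : Option ℕ :=
  if h : 1 < m then
    let p := pvSpf 2 m
    pvLoopB (pvDivOut p m) (some p)
  else ans
termination_by m
decreasing_by
  exact pvDivOut_lt _ _ (pvSpf_two_le 2 m (le_refl 2) h) (pvSpf_dvd 2 m) (Nat.lt_of_lt_of_le Nat.zero_lt_one (Nat.le_of_lt h))

def calculate_using_factorization_alt (n : Int) : Option Int :=
  if n < 2 then none
  else (pvLoopB n.toNat none).map Int.ofNat

-- ===== PRECONDITION & SPEC =====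
def Spec_calculate_using_factorization (n : Int) (out : Option Int) : Prop := out = calculate_using_factorization_alt n
instance (n : Int) (out : Option Int) : Decidable (Spec_calculate_using_factorization n out) := by unfold Spec_calculate_using_factorization; infer_instance

-- ===== CLAIM (what is proved, stated in full; the proofs are below) =====
def Claim_equal_calculate_using_factorization : Prop := ∀ (n : Int), Dom_calculate_using_factorization n → Spec_calculate_using_factorization n (calculate_using_factorization n)

-- ===== LEMMAS AND PROOFS =====

-- The greatest-prime-factor specification both programs satisfy
def GpfSpec (m g : ℕ) : Prop := g.Prime ∧ g ∣ m ∧ ∀ q : ℕ, q.Prime → q ∣ m → q ≤ g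

theorem GpfSpec_exists (m : ℕ) (hm : 2 ≤ m) : ∃ g, GpfSpec m g := by
  have hne : m.primeFactors.Nonempty := Nat.nonempty_primeFactors.mpr (by omega)
  refine ⟨m.primeFactors.max' hne, ?_, ?_, ?_⟩
  · exact (Nat.mem_primeFactors.mp (m.primeFactors.max'_mem hne)).1
  · exact (Nat.mem_primeFactors.mp (m.primeFactors.max'_mem hne)).2.1
  · intro q hq hqd
    exact Finset.le_max' _ _ (Nat.mem_primeFactors.mpr ⟨hq, hqd, by omega⟩)

-- --- pvStrip facts ---

theorem pvStrip_of_not_dvd (i num : ℕ) (acc : List ℕ) (h : ¬ i ∣ num) :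
    pvStrip i num acc = (num, acc) := by
  rw [pvStrip, dif_neg]; tauto

theorem pvStrip_prod (i num : ℕ) (acc : List ℕ) :
    (pvStrip i num acc).2.prod * (pvStrip i num acc).1 = acc.prod * num := by
  fun_induction pvStrip i num acc with
  | case1 num acc h ih =>
    rw [ih, List.prod_append, List.prod_singleton, mul_assoc,
      Nat.mul_div_cancel' h.2.1]
  | case2 num acc h => rfl

theorem pvStrip_mem (i num : ℕ) (acc : List ℕ) :
    ∀ x ∈ (pvStrip i num acc).2, x ∈ acc ∨ x = i := by
  fun_induction pvStrip i num acc with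
  | case1 num acc h ih =>
    intro x hx
    rcases ih x hx with hx' | hx'
    · rcases List.mem_append.mp hx' with h1 | h1
      · exact Or.inl h1
      · exact Or.inr (List.mem_singleton.mp h1)
    · exact Or.inr hx'
  | case2 num acc h => exact fun x hx => Or.inl hx

theorem pvStrip_dvd (i num : ℕ) (acc : List ℕ) : (pvStrip i num acc).1 ∣ num := by
  fun_induction pvStrip i num acc with
  | case1 num acc h ih => exact dvd_trans ih (Nat.div_dvd_of_dvd h.2.1)
  | case2 num acc h => exact dvd_refl num

theorem pvStrip_pos (i num : ℕ) (acc : List ℕ) :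
    0 < num → 0 < (pvStrip i num acc).1 := by
  fun_induction pvStrip i num acc with
  | case1 num acc h ih =>
    exact fun hn => ih (Nat.div_pos (Nat.le_of_dvd hn h.2.1) (by omega))
  | case2 num acc h => exact fun hn => hn

theorem pvStrip_not_dvd (i num : ℕ) (acc : List ℕ) (hi : 2 ≤ i) :
    0 < num → ¬ i ∣ (pvStrip i num acc).1 := by
  fun_induction pvStrip i num acc with
  | case1 num acc h ih =>
    exact fun hn => ih (Nat.div_pos (Nat.le_of_dvd hn h.2.1) (by omega))
  | case2 num acc h => exact fun hn hd => h ⟨hi, hd, hn⟩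

-- --- the odd-index loop invariant of A ---

theorem pvOdd_spec (i num : ℕ) (acc : List ℕ) : 3 ≤ i → i % 2 = 1 →
    0 < num → (∀ p : ℕ, p.Prime → p ∣ num → i ≤ p) →
    (∀ x ∈ acc, x.Prime) →
    (pvOdd i num acc).2.prod * (pvOdd i num acc).1 = acc.prod * num ∧
    (∀ x ∈ (pvOdd i num acc).2, x.Prime) ∧
    0 < (pvOdd i num acc).1 ∧
    ((pvOdd i num acc).1 = 1 ∨ ((pvOdd i num acc).1).Prime) := by
  fun_induction pvOdd i num acc with
  | case1 i num acc h r ih =>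
    intro hi hodd hn hmin hacc
    simp only [r] at ih ⊢
    have hrnum : r.1 ∣ num := pvStrip_dvd i num acc
    have hrpos : 0 < r.1 := pvStrip_pos i num acc hn
    have hrnd : ¬ i ∣ r.1 := pvStrip_not_dvd i num acc (by omega) hn
    have hracc : ∀ x ∈ r.2, x.Prime := by
      by_cases hdv : i ∣ num
      · -- i divides num, hence i is prime: its least factor divides num so is ≥ i
        have hiprime : i.Prime := by
          have h1 : i.minFac.Prime := Nat.minFac_prime (by omega)
          have h2 : i.minFac ∣ num := dvd_trans (Nat.minFac_dvd i) hdv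
          have h3 : i ≤ i.minFac := hmin _ h1 h2
          have h4 : i.minFac ≤ i := Nat.minFac_le (by omega)
          exact Nat.prime_def_minFac.mpr ⟨by omega, by omega⟩
        intro x hx
        rcases pvStrip_mem i num acc x hx with hx' | hx'
        · exact hacc x hx'
        · rw [hx']; exact hiprime
      · have : r = (num, acc) := pvStrip_of_not_dvd i num acc hdv
        rw [this]; exact hacc
    have hmin' : ∀ p : ℕ, p.Prime → p ∣ r.1 → i + 2 ≤ p := by
      intro p hp hpd
      have h1 : i ≤ p := hmin p hp (dvd_trans hpd hrnum)
      have h2 : p ≠ i := fun he => hrnd (he ▸ hpd)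
      have h3 : p ≠ i + 1 := by
        intro he
        have hpe : 2 ∣ p := by omega
        rcases (Nat.Prime.eq_one_or_self_of_dvd hp 2 hpe) with h | h <;> omega
      omega
    have := ih (by omega) (by omega) hrpos hmin' hracc
    refine ⟨?_, this.2.1, this.2.2.1, this.2.2.2⟩
    · rw [this.1, pvStrip_prod]
  | case2 i num acc h =>
    intro hi hodd hn hmin hacc
    refine ⟨rfl, hacc, hn, ?_⟩
    rcases Nat.lt_or_ge num 2 with h2 | h2
    · left; omega
    · right
      by_contra hnp
      have hsq : num.minFac * num.minFac ≤ num := by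
        have := Nat.minFac_sq_le_self (by omega) hnp
        simpa [pow_two] using this
      have h1 : num.minFac.Prime := Nat.minFac_prime (by omega)
      have h3 : i ≤ num.minFac := hmin _ h1 (Nat.minFac_dvd num)
      have : i * i ≤ num := le_trans (Nat.mul_le_mul h3 h3) hsq
      omega

-- --- B-side helper characterisations ---

theorem pvSpf_eq_minFac (d m : ℕ) (hm : 2 ≤ m) (hd : 2 ≤ d)
    (hinv : ∀ e, 2 ≤ e → e < d → ¬ e ∣ m) : pvSpf d m = m.minFac := by
  fun_induction pvSpf d m with
  | case1 d h hmod =>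
    have hdvd : d ∣ m := Nat.dvd_of_mod_eq_zero hmod
    have h1 : m.minFac ≤ d := Nat.minFac_le_of_dvd hd hdvd
    have h2 : m.minFac.Prime := Nat.minFac_prime (by omega)
    have h3 : ¬ m.minFac < d := fun hlt => hinv _ h2.two_le hlt (Nat.minFac_dvd m)
    omega
  | case2 d h hmod ih =>
    refine ih (by omega) ?_
    intro e he1 he2
    rcases Nat.lt_or_ge e d with h' | h'
    · exact hinv e he1 h'
    · have : e = d := by omega
      rw [this]
      intro hdvd
      exact hmod (Nat.dvd_iff_mod_eq_zero.mp hdvd)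
  | case3 d h =>
    have hp : m.Prime := by
      by_contra hnp
      have hsq : m.minFac * m.minFac ≤ m := by
        have := Nat.minFac_sq_le_self (by omega) hnp
        simpa [pow_two] using this
      have h1 : m.minFac.Prime := Nat.minFac_prime (by omega)
      have h2 : ¬ m.minFac < d := fun hlt => hinv _ h1.two_le hlt (Nat.minFac_dvd m)
      have : d * d ≤ m := le_trans (Nat.mul_le_mul (by omega) (by omega)) hsq
      omega
    exact (Nat.Prime.minFac_eq hp).symm

theorem pvDivOut_dvd (p m : ℕ) : pvDivOut p m ∣ m := by
  fun_induction pvDivOut p m with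
  | case1 m h ih => exact dvd_trans ih (Nat.div_dvd_of_dvd h.2.1)
  | case2 m h => exact dvd_refl m

theorem pvDivOut_pos (p m : ℕ) : 0 < m → 0 < pvDivOut p m := by
  fun_induction pvDivOut p m with
  | case1 m h ih => exact fun hm => ih (Nat.div_pos (Nat.le_of_dvd hm h.2.1) (by omega))
  | case2 m h => exact fun hm => hm

theorem pvDivOut_not_dvd (p m : ℕ) (hp : 2 ≤ p) :
    0 < m → ¬ p ∣ pvDivOut p m := by
  fun_induction pvDivOut p m with
  | case1 m h ih => exact fun hm => ih (Nat.div_pos (Nat.le_of_dvd hm h.2.1) (by omega))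
  | case2 m h => exact fun hm hd => h ⟨hp, hd, hm⟩

theorem pvDivOut_keep (p m q : ℕ) (hq : q.Prime) (hp : p.Prime) (hne : q ≠ p) :
    q ∣ m → q ∣ pvDivOut p m := by
  fun_induction pvDivOut p m with
  | case1 m h ih =>
    intro hdvd
    refine ih ?_
    have hm : m = p * (m / p) := (Nat.mul_div_cancel' h.2.1).symm
    have hqp : ¬ q ∣ p := by
      intro hqp
      exact hne ((Nat.prime_dvd_prime_iff_eq hq hp).mp hqp)
    rcases (Nat.Prime.dvd_mul hq).mp (hm ▸ hdvd) with h' | h'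
    · exact absurd h' hqp
    · exact h'
  | case2 m h => exact fun hdvd => hdvd

-- --- B's main loop computes the greatest prime factor ---

theorem pvLoopB_correct (m : ℕ) (hm : 2 ≤ m) (g : ℕ) (hg : GpfSpec m g)
    (ans : Option ℕ) : pvLoopB m ans = some g := by
  induction m using Nat.strong_induction_on generalizing ans with
  | _ m ih =>
    rw [pvLoopB, dif_pos (by omega : 1 < m)]
    set p := pvSpf 2 m with hpdef
    have hpm : p = m.minFac := pvSpf_eq_minFac 2 m hm (le_refl 2) (by omega)
    have hpprime : p.Prime := hpm ▸ Nat.minFac_prime (by omega)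
    have hpdvd : p ∣ m := hpm ▸ Nat.minFac_dvd m
    have hple : ∀ q : ℕ, q.Prime → q ∣ m → p ≤ q := by
      intro q hq hqd
      rw [hpm]
      exact Nat.minFac_le_of_dvd hq.two_le hqd
    set m' := pvDivOut p m with hm'def
    have hm'pos : 0 < m' := pvDivOut_pos p m (by omega : (0:ℕ) < m)
    have hm'lt : m' < m := pvDivOut_lt p m hpprime.two_le hpdvd (by omega)
    have hm'nd : ¬ p ∣ m' := pvDivOut_not_dvd p m hpprime.two_le (by omega : (0:ℕ) < m)
    rcases Nat.lt_or_ge m' 2 with h2 | h2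
    · -- m' = 1 : every prime factor of m equals p, so g = p, and the loop stops
      have hm'1 : m' = 1 := by omega
      have hgp : g = p := by
        by_contra hne
        have : g ∣ m' := pvDivOut_keep p m g hg.1 hpprime hne hg.2.1
        rw [hm'1] at this
        exact Nat.Prime.one_lt hg.1 |>.ne' (Nat.eq_one_of_dvd_one this) |>.elim
      rw [pvLoopB, dif_neg (by omega : ¬ 1 < m'), hgp]
    · -- m' ≥ 2 : g is still the greatest prime factor of m'
      have hgne : g ≠ p := by
        intro he
        have hq' : m'.minFac.Prime := Nat.minFac_prime (by omega)
        have hq'm : m'.minFac ∣ m := dvd_trans (Nat.minFac_dvd m') (pvDivOut_dvd p m)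
        have h1 : p ≤ m'.minFac := hple _ hq' hq'm
        have h2' : m'.minFac ≤ g := hg.2.2 _ hq' hq'm
        have h3 : m'.minFac = p := by omega
        exact hm'nd (h3 ▸ Nat.minFac_dvd m')
      have hg' : GpfSpec m' g := by
        refine ⟨hg.1, pvDivOut_keep p m g hg.1 hpprime hgne hg.2.1, ?_⟩
        intro q hq hqd
        exact hg.2.2 q hq (dvd_trans hqd (pvDivOut_dvd p m))
      exact ih m' hm'lt h2 hg' (some p)

-- --- A computes the greatest prime factor too ---

theorem pvA_factors (m g : ℕ) (hm : 2 ≤ m) (hg : GpfSpec m g) :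
    PySem.List.max?
      (if 1 < (pvOdd 3 (pvStrip 2 m []).1 (pvStrip 2 m []).2).1
       then (pvOdd 3 (pvStrip 2 m []).1 (pvStrip 2 m []).2).2 ++
              [(pvOdd 3 (pvStrip 2 m []).1 (pvStrip 2 m []).2).1]
       else (pvOdd 3 (pvStrip 2 m []).1 (pvStrip 2 m []).2).2)
      (fun x => x) = some g := by
  set r1 := pvStrip 2 m [] with hr1
  have h1prod : r1.2.prod * r1.1 = m := by
    have := pvStrip_prod 2 m []
    simpa using this
  have h1pos : 0 < r1.1 := pvStrip_pos 2 m [] (by omega)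
  have h1nd : ¬ 2 ∣ r1.1 := pvStrip_not_dvd 2 m [] (le_refl 2) (by omega)
  have h1acc : ∀ x ∈ r1.2, x.Prime := by
    intro x hx
    rcases pvStrip_mem 2 m [] x hx with hx' | hx'
    · simp at hx'
    · rw [hx']; exact Nat.prime_two
  have h1min : ∀ p : ℕ, p.Prime → p ∣ r1.1 → 3 ≤ p := by
    intro p hp hpd
    have h2 : 2 ≤ p := hp.two_le
    have : p ≠ 2 := fun he => h1nd (he ▸ hpd)
    omega
  have hodd := pvOdd_spec 3 r1.1 r1.2 (le_refl 3) rfl h1pos h1min h1acc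
  set r2 := pvOdd 3 r1.1 r1.2 with hr2
  set F := (if 1 < r2.1 then r2.2 ++ [r2.1] else r2.2) with hF
  have hFprod : F.prod = m := by
    rcases hodd.2.2.2 with h' | h'
    · have : ¬ 1 < r2.1 := by omega
      rw [hF, if_neg this]
      have := hodd.1
      rw [h'] at this
      omega
    · have : 1 < r2.1 := h'.one_lt
      rw [hF, if_pos this, List.prod_append, List.prod_singleton, hodd.1, h1prod]
  have hFprime : ∀ x ∈ F, x.Prime := by
    intro x hx
    rcases Nat.lt_or_ge 1 r2.1 with h' | h'
    · rw [hF, if_pos h'] at hx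
      rcases List.mem_append.mp hx with h1 | h1
      · exact hodd.2.1 x h1
      · rw [List.mem_singleton.mp h1]
        rcases hodd.2.2.2 with h'' | h'' <;> [omega; exact h'']
    · rw [hF, if_neg (by omega)] at hx
      exact hodd.2.1 x hx
  -- g is a member of F, and bounds every member
  have hgF : g ∈ F := by
    have hgd : g ∣ F.prod := hFprod ▸ hg.2.1
    rcases (Prime.dvd_prod_iff hg.1.prime).mp hgd with ⟨a, haF, hga⟩
    have : g = a := (Nat.prime_dvd_prime_iff_eq hg.1 (hFprime a haF)).mp hga
    exact this ▸ haF
  have hFle : ∀ x ∈ F, x ≤ g := by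
    intro x hx
    exact hg.2.2 x (hFprime x hx) (hFprod ▸ List.dvd_prod hx)
  -- hence max? F = some g
  rcases hmax : PySem.List.max? F (fun x => x) with _ | x
  · rw [PySem.List.max?_eq_none_iff] at hmax
    rw [hmax] at hgF
    simp at hgF
  · have hxF : x ∈ F := PySem.List.max?_mem hmax
    have hxmax : ∀ y ∈ F, y ≤ x := by
      intro y hy
      exact PySem.List.max?_isMax hmax y hy
    have : x = g := le_antisymm (hFle x hxF) (hxmax g hgF)
    rw [this]

-- ===== VERDICT (by name: the statement is the Claim_ definition above) =====
theorem calculate_using_factorization_spec : Claim_equal_calculate_using_factorization := by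
  intro n _
  unfold Spec_calculate_using_factorization calculate_using_factorization
    calculate_using_factorization_alt
  by_cases hn : n < 2
  · rw [if_pos hn, if_pos hn]
  · rw [if_neg hn, if_neg hn]
    have hm : 2 ≤ n.toNat := by omega
    obtain ⟨g, hg⟩ := GpfSpec_exists n.toNat hm
    have hA := pvA_factors n.toNat g hm hg
    have hB := pvLoopB_correct n.toNat hm g hg none
    simp only [] at hA ⊢
    rw [hA, hB]
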